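-- pv_equiv track=rewrite | github.com/Pradyumn23/pyhonfilemanager | mustard_analytics.py | num_single_locs
-- ===== SOURCE A (Python) =====
-- def num_single_locs(rows):
--     """Return the number of refueling locations that were visited exactly once.
--
--     Hint: store the locations and counts (as keys and values, respectively) in a dictionary,
--     then count up the number of entries with a value equal to one.
--     """
--     #
--     # fill in function body here
--     #
--     thisdict = {}
--     count = 0
--     for row in rows:
--       if row[2] in thisdict:
--         thisdict[row[2]]+=1
--       else:
--         thisdict[row[2]] = 1
--
--     for x in thisdict:
--        if thisdict[x]==1:
--          count+=1
--
--
--     return count  # fix this line to return an int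
-- ===== SOURCE B (Python) =====
-- def num_single_locs(rows):
--     """Return the number of refueling locations that were visited exactly once."""
--     seen_once = set()
--     seen_multiple = set()
--     for row in rows:
--         k = row[2]
--         if k in seen_once:
--             seen_once.discard(k)
--             seen_multiple.add(k)
--         elif k not in seen_multiple:
--             seen_once.add(k)
--     return len(seen_once)
-- ===== Notes on version B (the rewrite author's own statement) =====
-- stated objective: alternative
-- what changed: Replaces the count dictionary plus a second counting pass over its keys with a single traversal maintaining two sets (seen-once / seen-multiple) and returning the size of the first.
import Mathlib
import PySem

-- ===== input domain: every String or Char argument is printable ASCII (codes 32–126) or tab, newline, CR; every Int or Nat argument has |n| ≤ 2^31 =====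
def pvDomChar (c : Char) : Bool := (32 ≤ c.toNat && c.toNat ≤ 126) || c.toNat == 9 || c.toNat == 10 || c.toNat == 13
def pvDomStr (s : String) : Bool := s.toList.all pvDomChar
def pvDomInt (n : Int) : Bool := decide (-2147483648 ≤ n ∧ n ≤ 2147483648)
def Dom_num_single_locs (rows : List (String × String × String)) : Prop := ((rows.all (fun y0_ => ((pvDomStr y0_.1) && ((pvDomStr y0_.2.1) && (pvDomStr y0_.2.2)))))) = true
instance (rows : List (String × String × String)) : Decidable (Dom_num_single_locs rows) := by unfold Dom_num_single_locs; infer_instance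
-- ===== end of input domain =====

-- B replaces A's count-dictionary + second counting loop with one pass maintaining
-- seen-once / seen-multiple sets; return value equivalence is proved (objective: alternative).

-- ===== PORT A =====
def num_single_locs (rows : List (String × String × String)) : Int :=
  let thisdict : PySem.Dict String Int :=
    rows.foldl (fun d row =>
      if d.contains row.2.2 then d.insert row.2.2 (d.getD row.2.2 0 + 1)
      else d.insert row.2.2 1) PySem.Dict.empty
  -- 'thisdict[x]' for x a key of thisdict: getD with default 0 is exact here (x is always present)
  thisdict.keys.foldl (fun count x => if thisdict.getD x 0 == 1 then count + 1 else count) 0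

-- ===== PORT B =====
def num_single_locs_alt (rows : List (String × String × String)) : Int :=
  let p : PySem.Set String × PySem.Set String :=
    rows.foldl (fun st row =>
      let k := row.2.2
      if PySem.Set.contains st.1 k then (PySem.Set.discard st.1 k, PySem.Set.add st.2 k)
      else if PySem.Set.contains st.2 k then st
      else (PySem.Set.add st.1 k, st.2)) (PySem.Set.empty, PySem.Set.empty)
  PySem.Set.len p.1

-- ===== PRECONDITION & SPEC =====
def Spec_num_single_locs (rows : List (String × String × String)) (out : Int) : Prop := out = num_single_locs_alt rows
instance (rows : List (String × String × String)) (out : Int) : Decidable (Spec_num_single_locs rows out) := by unfold Spec_num_single_locs; infer_instance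

-- ===== CLAIM (what is proved, stated in full; the proofs are below) =====
def Claim_equal_num_single_locs : Prop := ∀ (rows : List (String × String × String)), Dom_num_single_locs rows → Spec_num_single_locs rows (num_single_locs rows)

-- ===== LEMMAS AND PROOFS =====

-- A's counting loop counts, over a key list, the keys whose count in l is 1.
lemma a_count_loop (ks : List String) (l : List String) (c : Int) :
    ks.foldl (fun count x => if (PySem.Dict.counter l).getD x 0 == 1 then count + 1 else count) c
      = c + (ks.countP (fun x => l.count x == 1) : Int) := by
  induction ks generalizing c with
  | nil => simp [List.countP]
  | cons x t ih =>
    rw [List.foldl_cons, ih]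
    simp only [List.countP_cons, PySem.Dict.getD_counter]
    by_cases h : l.count x = 1
    · simp [h]; ring
    · have hb : ((l.count x : Int) == 1) = false := by simpa using h
      have hb' : (l.count x == 1) = false := by simpa using h
      simp [hb, hb']

-- A's dict-building loop is Counter(l).
lemma a_dict_eq (l : List String) :
    l.foldl (fun d k =>
      if d.contains k then d.insert k (d.getD k 0 + 1) else d.insert k 1) PySem.Dict.empty
      = PySem.Dict.counter l := by
  rw [← PySem.Dict.foldl_insert_getD_add_one_eq_counter]
  congr 1
  funext d k
  by_cases h : d.contains k
  · simp [h]
  · have h0 : d.getD k 0 = 0 := PySem.Dict.getD_of_not_contains d 0 (by simpa using h)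
    simp [h, h0]

-- B's loop invariant: the seen-once set stays Nodup and its final membership is
-- characterised by occurrence counts in the remaining list.
lemma b_loop_inv (l : List String) :
    ∀ (once multi : List String), once.Nodup → multi.Nodup → (∀ k, k ∈ once → k ∉ multi) →
    let r := l.foldl (fun (st : List String × List String) k =>
      if PySem.Set.contains st.1 k then (PySem.Set.discard st.1 k, PySem.Set.add st.2 k)
      else if PySem.Set.contains st.2 k then st
      else (PySem.Set.add st.1 k, st.2)) (once, multi)
    r.1.Nodup ∧
    (∀ k, k ∈ r.1 ↔ (k ∉ multi ∧ ((k ∈ once ∧ l.count k = 0) ∨ (k ∉ once ∧ l.count k = 1)))) := by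
  induction l with
  | nil => intro once multi h1 _ h3; exact ⟨h1, fun k => by simp; tauto⟩
  | cons x t ih =>
    intro once multi h1 h2 h3
    simp only [List.foldl_cons]
    by_cases hx1 : PySem.Set.contains once x
    · have hxo : x ∈ once := by simpa [PySem.Set.contains_iff] using hx1
      simp only [hx1, if_pos]
      have := ih (PySem.Set.discard once x) (PySem.Set.add multi x)
        (PySem.Set.nodup_discard _ _ h1) (PySem.Set.nodup_add _ _ h2)
        (by intro k hk; rw [PySem.Set.mem_discard] at hk; rw [PySem.Set.mem_add]
            rintro (h | rfl); exacts [h3 k hk.1 h, hk.2 rfl])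
      refine ⟨this.1, fun k => ?_⟩
      rw [this.2 k, PySem.Set.mem_discard, PySem.Set.mem_add, List.count_cons]
      by_cases hk : x = k
      · subst hk; simp [hxo]
      · simp [hk, Ne.symm hk]; try tauto
    · have hxo : x ∉ once := by simpa [PySem.Set.contains_iff] using hx1
      by_cases hx2 : PySem.Set.contains multi x
      · have hxm : x ∈ multi := by simpa [PySem.Set.contains_iff] using hx2
        simp only [hx1, hx2, if_neg, if_pos, Bool.false_eq_true, not_false_iff]
        have := ih once multi h1 h2 h3
        refine ⟨this.1, fun k => ?_⟩
        rw [this.2 k, List.count_cons]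
        by_cases hk : x = k
        · subst hk; simp [hxm]
        · simp [hk]
      · have hxm : x ∉ multi := by simpa [PySem.Set.contains_iff] using hx2
        simp only [hx1, hx2, if_neg, Bool.false_eq_true, not_false_iff]
        have := ih (PySem.Set.add once x) multi (PySem.Set.nodup_add _ _ h1) h2
          (by intro k hk; rw [PySem.Set.mem_add] at hk
              rcases hk with h | rfl; exacts [h3 k h, hxm])
        refine ⟨this.1, fun k => ?_⟩
        rw [this.2 k, PySem.Set.mem_add, List.count_cons]
        by_cases hk : x = k
        · subst hk; simp [hxo, hxm]; try omega
        · simp [hk, Ne.symm hk]; try tauto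

-- pushing the row → row[2] projection through each fold
lemma foldA_map (rows : List (String × String × String)) (init : PySem.Dict String Int) :
    rows.foldl (fun d row =>
      if d.contains row.2.2 then d.insert row.2.2 (d.getD row.2.2 0 + 1)
      else d.insert row.2.2 1) init
    = (rows.map (fun row => row.2.2)).foldl (fun d k =>
      if d.contains k then d.insert k (d.getD k 0 + 1) else d.insert k 1) init := by
  induction rows generalizing init with
  | nil => rfl
  | cons r t ih => simp only [List.foldl_cons, List.map_cons, ih]

lemma foldB_map (rows : List (String × String × String)) (init : List String × List String) :
    rows.foldl (fun (st : List String × List String) row =>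
      let k := row.2.2
      if PySem.Set.contains st.1 k then (PySem.Set.discard st.1 k, PySem.Set.add st.2 k)
      else if PySem.Set.contains st.2 k then st
      else (PySem.Set.add st.1 k, st.2)) init
    = (rows.map (fun row => row.2.2)).foldl (fun (st : List String × List String) k =>
      if PySem.Set.contains st.1 k then (PySem.Set.discard st.1 k, PySem.Set.add st.2 k)
      else if PySem.Set.contains st.2 k then st
      else (PySem.Set.add st.1 k, st.2)) init := by
  induction rows generalizing init with
  | nil => rfl
  | cons r t ih => simp only [List.foldl_cons, List.map_cons, ih]

-- Two Nodup lists with the same members have the same length.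
lemma length_eq_of_nodup_mem {α : Type} {s t : List α} (hs : s.Nodup) (ht : t.Nodup)
    (h : ∀ x, x ∈ s ↔ x ∈ t) : s.length = t.length :=
  ((List.perm_ext_iff_of_nodup hs ht).mpr h).length_eq

-- ===== VERDICT (by name: the statement is the Claim_ definition above) =====
theorem num_single_locs_spec : Claim_equal_num_single_locs := by
  intro rows _
  unfold Spec_num_single_locs num_single_locs num_single_locs_alt
  rw [foldA_map, foldB_map, a_dict_eq]
  set l := rows.map (fun row => row.2.2) with hl
  have hinv := b_loop_inv l [] [] List.nodup_nil List.nodup_nil (by simp)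
  simp only [PySem.Dict.keys_counter]
  rw [a_count_loop (PySem.Set.ofList l) l 0]
  have hmem : ∀ x, x ∈ (PySem.Set.ofList l).filter (fun x => l.count x == 1) ↔
      x ∈ (l.foldl (fun (st : List String × List String) k =>
        if PySem.Set.contains st.1 k then (PySem.Set.discard st.1 k, PySem.Set.add st.2 k)
        else if PySem.Set.contains st.2 k then st
        else (PySem.Set.add st.1 k, st.2)) ([], [])).1 := by
    intro x
    rw [List.mem_filter, PySem.Set.mem_ofList, hinv.2 x]
    simp only [List.not_mem_nil, false_and, not_false_iff, true_and, false_or, beq_iff_eq]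
    constructor
    · rintro ⟨-, h⟩; exact h
    · intro h; exact ⟨List.count_pos_iff.mp (by omega), h⟩
  have hlen := length_eq_of_nodup_mem
    (List.Nodup.filter _ (PySem.Set.nodup_ofList l)) hinv.1 hmem
  rw [List.countP_eq_length_filter]
  simp only [PySem.Set.empty, PySem.Set.len, hlen]
  omega
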